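-- pv_equiv track=rewrite | github.com/BackofenLab/vaRRI | source/modifications.py | listBasepairs
-- ===== SOURCE A (Python) =====
-- def listBasepairs(struc: dict):
--     """Parse basepairs from a dot-bracket-like structure dictionary.
--
--     Uses a stack-based approach to match opening and closing brackets
--     and extract basepair index tuples for multiple bracket types.
--
--     Args:
--         struc (dict[int, str]): Mapping of positions to structure characters.
--
--     Returns:
--         list[tuple[int, int]]: Sorted list of basepair index pairs.
--     """
--     basepairs = []
--     open_basepairs = {"(": [], "<": [], "[": [], "{": []}
--     brackets = [("(",")"), ("[","]"), ("{", "}"), ("<",">")]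
--     for index, char in struc.items():
--         for (open, close) in brackets:
--             # check for open basepair, add to stack
--             if char == open:
--                 open_basepairs[open] += [index]
--                 break
--             # check for close basepair, remove from stack
--             # if stack empty, it is an intermolecular basepair
--             if char == close:
--                 if open_basepairs[open]:
--                     basepairs += [(open_basepairs[open].pop(), index)]
--                 break
--
--     basepairs.sort()
--     return basepairs
-- ===== SOURCE B (Python) =====
-- def listBasepairs(struc: dict):
--     """Four independent per-bracket passes over the structure, one shared
--     result list, then a single sort (alternative decomposition of A)."""
--     pairs = []
--     for op, cl in (("(", ")"), ("[", "]"), ("{", "}"), ("<", ">")):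
--         stack = []
--         for index, char in struc.items():
--             if char == op:
--                 stack.append(index)
--             elif char == cl and stack:
--                 pairs.append((stack.pop(), index))
--     pairs.sort()
--     return pairs
-- ===== Notes on version B (the rewrite author's own statement) =====
-- stated objective: alternative
-- what changed: Replaces A's single pass with an inner 4-way bracket-dispatch loop and a dict of four stacks by four independent passes, one per bracket pair, each filtering the items and maintaining a single plain list as stack, appending matched pairs to one shared list that is sorted once at the end.
import Mathlib
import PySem

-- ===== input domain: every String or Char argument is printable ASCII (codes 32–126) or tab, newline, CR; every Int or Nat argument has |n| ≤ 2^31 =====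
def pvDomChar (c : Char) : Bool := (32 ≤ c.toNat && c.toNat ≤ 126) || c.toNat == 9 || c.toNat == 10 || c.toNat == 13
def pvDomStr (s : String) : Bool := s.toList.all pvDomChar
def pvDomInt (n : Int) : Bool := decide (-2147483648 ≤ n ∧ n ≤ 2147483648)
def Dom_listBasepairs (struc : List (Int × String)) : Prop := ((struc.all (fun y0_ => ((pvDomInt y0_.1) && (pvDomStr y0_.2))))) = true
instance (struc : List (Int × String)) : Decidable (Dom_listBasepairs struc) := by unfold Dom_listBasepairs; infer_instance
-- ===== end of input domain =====

-- B replaces A's single pass (with an inner 4-bracket dispatch loop) by four independent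
-- filtered passes, one per bracket type; objective: alternative decomposition, same cost class.

-- ===== PORT A =====
-- brackets = [("(",")"), ("[","]"), ("{", "}"), ("<",">")]
def bracketsA : List (String × String) := [("(", ")"), ("[", "]"), ("{", "}"), ("<", ">")]

-- the inner 'for (open, close) in brackets' loop with its two breaks, as recursion over the bracket list
def aInner (index : Int) (char : String) :
    List (String × String) → (List (Int × Int) × PySem.Dict String (List Int)) →
    (List (Int × Int) × PySem.Dict String (List Int))
  | [], st => st
  | (o, c) :: rest, (bps, d) =>
      if char = o then (bps, d.modify o [] (· ++ [index]))        -- open_basepairs[open] += [index]; break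
      else if char = c then
        (if d.getD o [] ≠ [] then                                 -- if open_basepairs[open]:
          match PySem.List.pop? (d.getD o []) (-1) with           -- open_basepairs[open].pop()
          | some (v, s') => (bps ++ [(v, index)], d.insert o s')
          | none => (bps, d)
        else (bps, d))                                            -- break
      else aInner index char rest (bps, d)

def listBasepairs (struc : List (Int × String)) : List (Int × Int) :=
  let open_basepairs : PySem.Dict String (List Int) :=
    PySem.Dict.ofList [("(", []), ("<", []), ("[", []), ("{", [])]
  let st := (PySem.Dict.ofList struc).items.foldl
      (fun st p => aInner p.1 p.2 bracketsA st) ([], open_basepairs)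
  PySem.List.sorted2 st.1 Prod.fst Prod.snd    -- basepairs.sort() on int pairs (lexicographic)

-- ===== PORT B =====
-- one pass for a single bracket pair, state = (stack, pairs)
def bPass (items : List (Int × String)) (o c : String) (pairs : List (Int × Int)) : List (Int × Int) :=
  (items.foldl (fun (st : List Int × List (Int × Int)) p =>
      if p.2 = o then (st.1 ++ [p.1], st.2)                        -- stack.append(index)
      else if p.2 = c ∧ st.1 ≠ [] then
        match PySem.List.pop? st.1 (-1) with                       -- stack.pop()
        | some (v, s') => (s', st.2 ++ [(v, p.1)])
        | none => st
      else st) ([], pairs)).2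

def listBasepairs_alt (struc : List (Int × String)) : List (Int × Int) :=
  let items := (PySem.Dict.ofList struc).items
  let pairs := [("(", ")"), ("[", "]"), ("{", "}"), ("<", ">")].foldl
      (fun pairs (oc : String × String) => bPass items oc.1 oc.2 pairs) []
  PySem.List.sorted2 pairs Prod.fst Prod.snd

-- ===== PRECONDITION & SPEC =====
def Spec_listBasepairs (struc : List (Int × String)) (out : List (Int × Int)) : Prop := out = listBasepairs_alt struc
instance (struc : List (Int × String)) (out : List (Int × Int)) : Decidable (Spec_listBasepairs struc out) := by unfold Spec_listBasepairs; infer_instance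

-- ===== CLAIM (what is proved, stated in full; the proofs are below) =====
def Claim_equal_listBasepairs : Prop := ∀ (struc : List (Int × String)), Dom_listBasepairs struc → Spec_listBasepairs struc (listBasepairs struc)

-- ===== LEMMAS AND PROOFS =====

-- the pairs emitted by one bracket pass, starting from stack s
def emitPairs (o c : String) : List (Int × String) → List Int → List (Int × Int)
  | [], _ => []
  | p :: l, s =>
      if p.2 = o then emitPairs o c l (s ++ [p.1])
      else if p.2 = c ∧ s ≠ [] then
        match PySem.List.pop? s (-1) with
        | some (v, s') => (v, p.1) :: emitPairs o c l s'
        | none => emitPairs o c l s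
      else emitPairs o c l s

theorem bPass_eq_emitPairs (o c : String) (l : List (Int × String)) :
    ∀ (s : List Int) (pr : List (Int × Int)),
    (l.foldl (fun (st : List Int × List (Int × Int)) p =>
      if p.2 = o then (st.1 ++ [p.1], st.2)
      else if p.2 = c ∧ st.1 ≠ [] then
        match PySem.List.pop? st.1 (-1) with
        | some (v, s') => (s', st.2 ++ [(v, p.1)])
        | none => st
      else st) (s, pr)).2 = pr ++ emitPairs o c l s := by
  induction l with
  | nil => intro s pr; simp [emitPairs]
  | cons p l ih =>
      intro s pr
      simp only [List.foldl_cons, emitPairs]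
      by_cases h1 : p.2 = o
      · simp [h1, ih]
      · by_cases h2 : p.2 = c ∧ s ≠ []
        · have hco : ¬ (c = o) := fun h => h1 (h2.1.trans h)
          simp only [if_neg h1, if_pos h2]
          cases hp : PySem.List.pop? s (-1) with
          | none => simp [ih]
          | some r => cases r with
            | mk v s' => simp [ih]
        · simp [h1, h2, ih]

-- A's fold, abbreviated for the lemmas
def aFold (l : List (Int × String)) (st : List (Int × Int) × PySem.Dict String (List Int)) :
    List (Int × Int) × PySem.Dict String (List Int) :=
  l.foldl (fun st p => aInner p.1 p.2 bracketsA st) st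

-- the multiset of pairs A collects = the four per-bracket passes, each on its own stack
theorem aFold_perm (l : List (Int × String)) :
    ∀ (bps : List (Int × Int)) (d : PySem.Dict String (List Int)),
    ((aFold l (bps, d)).1 : Multiset (Int × Int)) =
      (bps : Multiset (Int × Int))
      + (emitPairs "(" ")" l (d.getD "(" []) : Multiset (Int × Int))
      + (emitPairs "[" "]" l (d.getD "[" []) : Multiset (Int × Int))
      + (emitPairs "{" "}" l (d.getD "{" []) : Multiset (Int × Int))
      + (emitPairs "<" ">" l (d.getD "<" []) : Multiset (Int × Int)) := by
  induction l with
  | nil => intro bps d; simp [aFold, emitPairs]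
  | cons p l ih =>
    intro bps d
    rw [show aFold (p :: l) (bps, d) = aFold l (aInner p.1 p.2 bracketsA (bps, d)) from rfl]
    by_cases h1 : p.2 = "("
    · simp [aInner, bracketsA, h1, ih, emitPairs, PySem.Dict.getD_modify]
    by_cases h2 : p.2 = ")"
    · by_cases hne : d.getD "(" [] = []
      · simp [aInner, bracketsA, h1, h2, hne, ih, emitPairs]
      · cases hp : PySem.List.pop? (d.getD "(" []) (-1) with
        | none => simp [aInner, bracketsA, h1, h2, hne, hp, ih, emitPairs]
        | some r =>
          cases r with
          | mk v s' =>
            simp [aInner, bracketsA, h1, h2, hne, hp, ih, emitPairs,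
              PySem.Dict.getD_insert, ← Multiset.coe_add]
            simp only [← Multiset.cons_coe, ← Multiset.singleton_add]
            abel
    by_cases h3 : p.2 = "["
    · simp [aInner, bracketsA, h1, h2, h3, ih, emitPairs, PySem.Dict.getD_modify]
    by_cases h4 : p.2 = "]"
    · by_cases hne : d.getD "[" [] = []
      · simp [aInner, bracketsA, h1, h2, h3, h4, hne, ih, emitPairs]
      · cases hp : PySem.List.pop? (d.getD "[" []) (-1) with
        | none => simp [aInner, bracketsA, h1, h2, h3, h4, hne, hp, ih, emitPairs]
        | some r =>
          cases r with
          | mk v s' =>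
            simp [aInner, bracketsA, h1, h2, h3, h4, hne, hp, ih, emitPairs,
              PySem.Dict.getD_insert, ← Multiset.coe_add]
            simp only [← Multiset.cons_coe, ← Multiset.singleton_add]
            abel
    by_cases h5 : p.2 = "{"
    · simp [aInner, bracketsA, h1, h2, h3, h4, h5, ih, emitPairs, PySem.Dict.getD_modify]
    by_cases h6 : p.2 = "}"
    · by_cases hne : d.getD "{" [] = []
      · simp [aInner, bracketsA, h1, h2, h3, h4, h5, h6, hne, ih, emitPairs]
      · cases hp : PySem.List.pop? (d.getD "{" []) (-1) with
        | none => simp [aInner, bracketsA, h1, h2, h3, h4, h5, h6, hne, hp, ih, emitPairs]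
        | some r =>
          cases r with
          | mk v s' =>
            simp [aInner, bracketsA, h1, h2, h3, h4, h5, h6, hne, hp, ih, emitPairs,
              PySem.Dict.getD_insert, ← Multiset.coe_add]
            simp only [← Multiset.cons_coe, ← Multiset.singleton_add]
            abel
    by_cases h7 : p.2 = "<"
    · simp [aInner, bracketsA, h1, h2, h3, h4, h5, h6, h7, ih, emitPairs, PySem.Dict.getD_modify]
    by_cases h8 : p.2 = ">"
    · by_cases hne : d.getD "<" [] = []
      · simp [aInner, bracketsA, h1, h2, h3, h4, h5, h6, h7, h8, hne, ih, emitPairs]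
      · cases hp : PySem.List.pop? (d.getD "<" []) (-1) with
        | none => simp [aInner, bracketsA, h1, h2, h3, h4, h5, h6, h7, h8, hne, hp, ih, emitPairs]
        | some r =>
          cases r with
          | mk v s' =>
            simp [aInner, bracketsA, h1, h2, h3, h4, h5, h6, h7, h8, hne, hp, ih, emitPairs,
              PySem.Dict.getD_insert, ← Multiset.coe_add]
            simp only [← Multiset.cons_coe, ← Multiset.singleton_add]
            abel
    simp [aInner, bracketsA, h1, h2, h3, h4, h5, h6, h7, h8, ih, emitPairs]

theorem sorted2_eq_sorted_lex (xs : List (Int × Int)) :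
    PySem.List.sorted2 xs Prod.fst Prod.snd false
      = PySem.List.sorted xs (fun p => toLex p) false := by
  simp only [PySem.List.sorted2, PySem.List.sorted]
  congr 1
  funext acc x
  congr 1
  funext a b
  rcases lt_trichotomy a.1 b.1 with h | h | h
  · simp [Prod.Lex.lt_iff, h, lt_asymm h]
  · simp [Prod.Lex.lt_iff, h]
  · simp [Prod.Lex.lt_iff, h, lt_asymm h, ne_of_gt h]

theorem sorted2_eq_of_perm (xs ys : List (Int × Int)) (h : xs.Perm ys) :
    PySem.List.sorted2 xs Prod.fst Prod.snd false
      = PySem.List.sorted2 ys Prod.fst Prod.snd false := by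
  rw [sorted2_eq_sorted_lex, sorted2_eq_sorted_lex]
  exact PySem.List.sorted_eq_sorted_of_perm xs ys _ (fun a b hab => by
    simpa using congrArg ofLex hab) h

-- ===== VERDICT (by name: the statement is the Claim_ definition above) =====
theorem listBasepairs_spec : Claim_equal_listBasepairs := by
  intro struc _
  unfold Spec_listBasepairs listBasepairs listBasepairs_alt
  apply sorted2_eq_of_perm
  rw [← Multiset.coe_eq_coe]
  have hB : ([("(", ")"), ("[", "]"), ("{", "}"), ("<", ">")].foldl
      (fun pairs (oc : String × String) => bPass (PySem.Dict.ofList struc).items oc.1 oc.2 pairs) []) =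
      emitPairs "(" ")" (PySem.Dict.ofList struc).items []
      ++ emitPairs "[" "]" (PySem.Dict.ofList struc).items []
      ++ emitPairs "{" "}" (PySem.Dict.ofList struc).items []
      ++ emitPairs "<" ">" (PySem.Dict.ofList struc).items [] := by
    simp [bPass, bPass_eq_emitPairs]
  rw [hB]
  have hA := aFold_perm (PySem.Dict.ofList struc).items []
      (PySem.Dict.ofList [("(", []), ("<", []), ("[", []), ("{", [])])
  simp only [aFold] at hA
  have hg1 : (PySem.Dict.ofList [("(", ([] : List Int)), ("<", []), ("[", []), ("{", [])]).getD "(" [] = [] := by rfl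
  have hg2 : (PySem.Dict.ofList [("(", ([] : List Int)), ("<", []), ("[", []), ("{", [])]).getD "[" [] = [] := by rfl
  have hg3 : (PySem.Dict.ofList [("(", ([] : List Int)), ("<", []), ("[", []), ("{", [])]).getD "{" [] = [] := by rfl
  have hg4 : (PySem.Dict.ofList [("(", ([] : List Int)), ("<", []), ("[", []), ("{", [])]).getD "<" [] = [] := by rfl
  rw [hg1, hg2, hg3, hg4] at hA
  rw [hA]
  simp [← Multiset.coe_add, add_assoc]
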